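-- pv_equiv track=rewrite | github.com/RoelandMatthijssens/RangeEquityCalculator | range_parser.py | parse_sub_range
-- ===== SOURCE A (Python) =====
-- codes_to_rank_map = {
--     '2': 0, '3': 1, '4': 2, '5': 3, '6': 4, '7': 5, '8': 6, '9': 7,
--     'T': 8, 'J': 9, 'Q': 10, 'K': 11, 'A': 12
-- }
--
-- rank_to_codes_map = {
--     0: '2', 1: '3', 2: '4', 3: '5', 4: '6', 5: '7', 6: '8', 7: '9',
--     8: 'T', 9: 'J', 10: 'Q', 11: 'K', 12: 'A'
-- }
--
-- def min_to_max_connectors_and_gappers(a, b):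
--     rank_11 = codes_to_rank_map[a[0]]
--     rank_21 = codes_to_rank_map[b[0]]
--     rank_22 = codes_to_rank_map[b[1]]
--     result = []
--     while rank_11 >= rank_21:
--         hand = rank_to_codes_map[rank_21] + rank_to_codes_map[rank_22]
--         result.append(hand)
--         rank_21 += 1
--         rank_22 += 1
--     return result
--
-- def min_to_max(a, b):
--     if a[0] == a[1] and b[0] == b[1]:
--         return min_to_max_pairs(a, b)
--     elif a[0] == b[0] and a[1] != b[1]:
--         return min_to_max_non_pairs(a, b)
--     else:
--         return min_to_max_connectors_and_gappers(a, b)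
--
-- def min_to_max_pairs(a, b):
--     rank_a = codes_to_rank_map[a[0]]
--     rank_b = codes_to_rank_map[b[0]]
--     top = max(rank_a, rank_b)
--     bottom = min(rank_a, rank_b)
--     return [rank_to_codes_map[i] * 2 for i in range(bottom, top + 1)]
--
-- def min_to_max_non_pairs(a, b):
--     rank_12 = codes_to_rank_map[a[1]]
--     rank_22 = codes_to_rank_map[b[1]]
--     min_rank_2 = min(rank_12, rank_22)
--     max_rank_2 = max(rank_12, rank_22)
--     return [a[0] + rank_to_codes_map[i] for i in range(min_rank_2, max_rank_2 + 1)]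
--
-- def is_plus_range(hand_range):
--     return '+' in hand_range
--
-- def plus_range(hand_range):
--     a = hand_range[0]
--     b = hand_range[1]
--     if a == b:
--         return min_to_max('AA', hand_range)
--     else:
--         rank_a = codes_to_rank_map[a]
--         rank_b = codes_to_rank_map[b]
--         highest_card = max(rank_a, rank_b)
--         lowest_card = min(rank_a, rank_b)
--         # A7 gets transformed to AK-A7
--         top_hand = rank_to_codes_map[highest_card] + rank_to_codes_map[highest_card - 1]
--         bottom_hand = rank_to_codes_map[highest_card] + rank_to_codes_map[lowest_card]
--         return min_to_max(bottom_hand, top_hand)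
--
-- def is_dash_range(hand_range):
--     return '-' in hand_range
--
-- def single_hand(hand_range):
--     low_card = min(codes_to_rank_map[hand_range[0]], codes_to_rank_map[hand_range[1]])
--     high_card = max(codes_to_rank_map[hand_range[0]], codes_to_rank_map[hand_range[1]])
--     return rank_to_codes_map[high_card] + rank_to_codes_map[low_card]
--
-- def dash_range(hand_range):
--     top, bottom = hand_range.split('-')
--     return min_to_max(top, bottom)
--
-- def parse_sub_range(sub_range):
--     result = set()
--
--     if is_plus_range(sub_range):
--         for i in plus_range(sub_range.strip('+')):
--             result.add(i)
--     elif is_dash_range(sub_range):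
--         for i in dash_range(sub_range):
--             result.add(i)
--     else:
--         result.add(single_hand(sub_range))
--
--     return result
-- ===== SOURCE B (Python) =====
-- RANKS = '23456789TJQKA'
--
--
-- def _predicate(sub_range):
--     # Compile the token into a membership test on (high_index, low_index) grid cells.
--     if '+' in sub_range:
--         core = sub_range.strip('+')
--         if core[0] == core[1]:
--             r = RANKS.index(core[0])
--             return lambda i, j: i == j and r <= i
--         hi = max(RANKS.index(core[0]), RANKS.index(core[1]))
--         lo = min(RANKS.index(core[0]), RANKS.index(core[1]))
--         return lambda i, j: i == hi and lo <= j < hi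
--     if '-' in sub_range:
--         top, bottom = sub_range.split('-')
--         if top[0] == top[1] and bottom[0] == bottom[1]:
--             lo = min(RANKS.index(top[0]), RANKS.index(bottom[0]))
--             hi = max(RANKS.index(top[0]), RANKS.index(bottom[0]))
--             return lambda i, j: i == j and lo <= i <= hi
--         if top[0] == bottom[0] and top[1] != bottom[1]:
--             a = RANKS.index(top[0])
--             lo = min(RANKS.index(top[1]), RANKS.index(bottom[1]))
--             hi = max(RANKS.index(top[1]), RANKS.index(bottom[1]))
--             return lambda i, j: i == a and lo <= j <= hi
--         t = RANKS.index(top[0])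
--         b0 = RANKS.index(bottom[0])
--         b1 = RANKS.index(bottom[1])
--         return lambda i, j: i - j == b0 - b1 and b0 <= i <= t
--     hi = max(RANKS.index(sub_range[0]), RANKS.index(sub_range[1]))
--     lo = min(RANKS.index(sub_range[0]), RANKS.index(sub_range[1]))
--     return lambda i, j: i == hi and j == lo
--
--
-- def parse_sub_range(sub_range):
--     pred = _predicate(sub_range)
--     return {RANKS[i] + RANKS[j]
--             for i in range(13) for j in range(13) if pred(i, j)}
-- ===== Notes on version B (the rewrite author's own statement) =====
-- stated objective: alternative
-- what changed: B compiles the token into a membership predicate on (high,low) rank-index pairs and materialises the hand set by filtering the full 13x13 rank grid with one comprehension, instead of A's per-case interval-expansion helpers (while loop, two range builders) driven by two char<->rank translation dicts.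
-- outside the precondition, e.g. on parse_sub_range('#7-#9'): A returns {'#7', '#9', '#8'}, B raises ValueError
import Mathlib
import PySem

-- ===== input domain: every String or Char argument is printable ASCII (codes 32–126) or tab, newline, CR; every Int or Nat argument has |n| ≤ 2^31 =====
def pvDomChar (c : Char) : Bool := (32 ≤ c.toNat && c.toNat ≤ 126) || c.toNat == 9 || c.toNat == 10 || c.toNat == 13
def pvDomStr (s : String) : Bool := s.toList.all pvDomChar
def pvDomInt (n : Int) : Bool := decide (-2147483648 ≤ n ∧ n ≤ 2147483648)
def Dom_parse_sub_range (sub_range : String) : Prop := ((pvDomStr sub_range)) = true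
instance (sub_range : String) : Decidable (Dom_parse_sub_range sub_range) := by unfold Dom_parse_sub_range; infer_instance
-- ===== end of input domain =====

-- B replaces A's per-case interval-expansion helpers by generate-and-filter: the token is
-- compiled into a membership predicate and the hand set is the full 13×13 rank grid
-- filtered by it (objective: alternative algorithm, not speed).
-- Both Pythons return a set; the ports return its element list (compared as a finite set).

-- ===== PORT A =====
-- Hands are kept as List Char (1-char Python strings concatenate to these lists);
-- the final result converts to String via String.ofList.  Dict lookups use getD with a junk
-- default: the KeyError inputs are exactly the ones Pre_ excludes.
def codes_to_rank_map : PySem.Dict Char Int := PySem.Dict.ofList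
  [('2',0),('3',1),('4',2),('5',3),('6',4),('7',5),('8',6),('9',7),('T',8),('J',9),('Q',10),('K',11),('A',12)]

def rank_to_codes_map : PySem.Dict Int (List Char) := PySem.Dict.ofList
  [(0,['2']),(1,['3']),(2,['4']),(3,['5']),(4,['6']),(5,['7']),(6,['8']),(7,['9']),
   (8,['T']),(9,['J']),(10,['Q']),(11,['K']),(12,['A'])]

-- the 'while rank_11 >= rank_21' loop of min_to_max_connectors_and_gappers
def connLoop (rank11 rank21 rank22 : Int) (result : List (List Char)) : List (List Char) :=
  if rank11 ≥ rank21 then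
    connLoop rank11 (rank21 + 1) (rank22 + 1)
      (result ++ [rank_to_codes_map.getD rank21 [] ++ rank_to_codes_map.getD rank22 []])
  else result
termination_by (rank11 + 1 - rank21).toNat
decreasing_by omega

def min_to_max_connectors_and_gappers (a b : List Char) : List (List Char) :=
  let rank11 := codes_to_rank_map.getD (PySem.List.pyGetD a 0 ' ') (-1)
  let rank21 := codes_to_rank_map.getD (PySem.List.pyGetD b 0 ' ') (-1)
  let rank22 := codes_to_rank_map.getD (PySem.List.pyGetD b 1 ' ') (-1)
  connLoop rank11 rank21 rank22 []

def min_to_max_pairs (a b : List Char) : List (List Char) :=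
  let rank_a := codes_to_rank_map.getD (PySem.List.pyGetD a 0 ' ') (-1)
  let rank_b := codes_to_rank_map.getD (PySem.List.pyGetD b 0 ' ') (-1)
  let top := max rank_a rank_b
  let bottom := min rank_a rank_b
  (PySem.List.pyRange bottom (top + 1) 1).map
    (fun i => PySem.List.pyRepeat (rank_to_codes_map.getD i []) 2)

def min_to_max_non_pairs (a b : List Char) : List (List Char) :=
  let rank12 := codes_to_rank_map.getD (PySem.List.pyGetD a 1 ' ') (-1)
  let rank22 := codes_to_rank_map.getD (PySem.List.pyGetD b 1 ' ') (-1)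
  let minRank2 := min rank12 rank22
  let maxRank2 := max rank12 rank22
  (PySem.List.pyRange minRank2 (maxRank2 + 1) 1).map
    (fun i => [PySem.List.pyGetD a 0 ' '] ++ rank_to_codes_map.getD i [])

def min_to_max (a b : List Char) : List (List Char) :=
  if PySem.List.pyGetD a 0 ' ' = PySem.List.pyGetD a 1 ' ' ∧
     PySem.List.pyGetD b 0 ' ' = PySem.List.pyGetD b 1 ' ' then
    min_to_max_pairs a b
  else if PySem.List.pyGetD a 0 ' ' = PySem.List.pyGetD b 0 ' ' ∧
          PySem.List.pyGetD a 1 ' ' ≠ PySem.List.pyGetD b 1 ' ' then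
    min_to_max_non_pairs a b
  else
    min_to_max_connectors_and_gappers a b

def plus_range (hand_range : List Char) : List (List Char) :=
  let a := PySem.List.pyGetD hand_range 0 ' '
  let b := PySem.List.pyGetD hand_range 1 ' '
  if a = b then
    min_to_max ['A', 'A'] hand_range
  else
    let rank_a := codes_to_rank_map.getD a (-1)
    let rank_b := codes_to_rank_map.getD b (-1)
    let highest := max rank_a rank_b
    let lowest := min rank_a rank_b
    let top_hand := rank_to_codes_map.getD highest [] ++ rank_to_codes_map.getD (highest - 1) []
    let bottom_hand := rank_to_codes_map.getD highest [] ++ rank_to_codes_map.getD lowest []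
    min_to_max bottom_hand top_hand

def single_hand (hand_range : List Char) : List Char :=
  let low := min (codes_to_rank_map.getD (PySem.List.pyGetD hand_range 0 ' ') (-1))
                 (codes_to_rank_map.getD (PySem.List.pyGetD hand_range 1 ' ') (-1))
  let high := max (codes_to_rank_map.getD (PySem.List.pyGetD hand_range 0 ' ') (-1))
                  (codes_to_rank_map.getD (PySem.List.pyGetD hand_range 1 ' ') (-1))
  rank_to_codes_map.getD high [] ++ rank_to_codes_map.getD low []

-- 'top, bottom = hand_range.split('-')': other part counts raise ValueError (excluded by Pre_)
def dash_range (hand_range : List Char) : List (List Char) :=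
  match PySem.Chars.splitOn hand_range ['-'] with
  | [top, bottom] => min_to_max top bottom
  | _ => []

def parse_sub_range (sub_range : String) : List String :=
  let cs := sub_range.toList
  let result : PySem.Set (List Char) :=
    if PySem.Chars.isIn ['+'] cs then
      (plus_range (PySem.Chars.stripChars cs ['+'])).foldl PySem.Set.add PySem.Set.empty
    else if PySem.Chars.isIn ['-'] cs then
      (dash_range cs).foldl PySem.Set.add PySem.Set.empty
    else
      PySem.Set.add PySem.Set.empty (single_hand cs)
  result.map String.ofList

-- ===== PORT B =====
def bRANKS : List Char := ['2','3','4','5','6','7','8','9','T','J','Q','K','A']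

-- RANKS.index(c); the ValueError inputs are exactly the ones Pre_ excludes (-1 is junk there)
def bIdx (c : Char) : Int := PySem.Chars.find bRANKS [c]

-- RANKS[i]; IndexError excluded by Pre_
def bAt (i : Int) : Char := PySem.List.pyGetD bRANKS i ' '

-- _predicate(sub_range): compile the token into a membership test on grid cells (i, j)
def bPred (cs : List Char) : Int → Int → Bool :=
  if PySem.Chars.isIn ['+'] cs then
    let core := PySem.Chars.stripChars cs ['+']
    if PySem.List.pyGetD core 0 ' ' = PySem.List.pyGetD core 1 ' ' then
      let r := bIdx (PySem.List.pyGetD core 0 ' ')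
      fun i j => decide (i = j ∧ r ≤ i)
    else
      let hi := max (bIdx (PySem.List.pyGetD core 0 ' ')) (bIdx (PySem.List.pyGetD core 1 ' '))
      let lo := min (bIdx (PySem.List.pyGetD core 0 ' ')) (bIdx (PySem.List.pyGetD core 1 ' '))
      fun i j => decide (i = hi ∧ lo ≤ j ∧ j < hi)
  else if PySem.Chars.isIn ['-'] cs then
    match PySem.Chars.splitOn cs ['-'] with
    | [top, bottom] =>
      if PySem.List.pyGetD top 0 ' ' = PySem.List.pyGetD top 1 ' ' ∧
         PySem.List.pyGetD bottom 0 ' ' = PySem.List.pyGetD bottom 1 ' ' then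
        let lo := min (bIdx (PySem.List.pyGetD top 0 ' ')) (bIdx (PySem.List.pyGetD bottom 0 ' '))
        let hi := max (bIdx (PySem.List.pyGetD top 0 ' ')) (bIdx (PySem.List.pyGetD bottom 0 ' '))
        fun i j => decide (i = j ∧ lo ≤ i ∧ i ≤ hi)
      else if PySem.List.pyGetD top 0 ' ' = PySem.List.pyGetD bottom 0 ' ' ∧
              PySem.List.pyGetD top 1 ' ' ≠ PySem.List.pyGetD bottom 1 ' ' then
        let a := bIdx (PySem.List.pyGetD top 0 ' ')
        let lo := min (bIdx (PySem.List.pyGetD top 1 ' ')) (bIdx (PySem.List.pyGetD bottom 1 ' '))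
        let hi := max (bIdx (PySem.List.pyGetD top 1 ' ')) (bIdx (PySem.List.pyGetD bottom 1 ' '))
        fun i j => decide (i = a ∧ lo ≤ j ∧ j ≤ hi)
      else
        let t := bIdx (PySem.List.pyGetD top 0 ' ')
        let b0 := bIdx (PySem.List.pyGetD bottom 0 ' ')
        let b1 := bIdx (PySem.List.pyGetD bottom 1 ' ')
        fun i j => decide (i - j = b0 - b1 ∧ b0 ≤ i ∧ i ≤ t)
    | _ => fun _ _ => false
  else
    let hi := max (bIdx (PySem.List.pyGetD cs 0 ' ')) (bIdx (PySem.List.pyGetD cs 1 ' '))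
    let lo := min (bIdx (PySem.List.pyGetD cs 0 ' ')) (bIdx (PySem.List.pyGetD cs 1 ' '))
    fun i j => decide (i = hi ∧ j = lo)

-- {RANKS[i] + RANKS[j] for i in range(13) for j in range(13) if pred(i, j)}
def parse_sub_range_alt (sub_range : String) : List String :=
  let pred := bPred sub_range.toList
  (PySem.Set.ofList ((PySem.List.pyRange 0 13 1).flatMap (fun i =>
    ((PySem.List.pyRange 0 13 1).filter (fun j => pred i j)).map
      (fun j => [bAt i, bAt j])))).map String.ofList

-- ===== PRECONDITION & SPEC =====
def pvRanks : List Char := ['2','3','4','5','6','7','8','9','T','J','Q','K','A']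

-- Pre_ excludes exactly the inputs where A raises: KeyError (a non-rank character is looked
-- up, incl. the connectors loop walking past 'A'), IndexError (a token shorter than 2), and
-- ValueError ('-'-split not giving exactly two parts).  One further exclusion on which A
-- still RETURNS a value: same-first-card dash ranges whose shared first character is not a
-- rank code (e.g. '#7-#9'), where A emits garbage hand strings containing that character
-- which no rank-grid hand can equal, while B raises ValueError; an example is cited in
-- the claim file.
def Pre_parse_sub_range (sub_range : String) : Prop :=
  let cs := sub_range.toList
  if PySem.Chars.isIn ['+'] cs then
    let core := PySem.Chars.stripChars cs ['+']
    2 ≤ core.length ∧ core.getD 0 ' ' ∈ pvRanks ∧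
      (core.getD 0 ' ' ≠ core.getD 1 ' ' → core.getD 1 ' ' ∈ pvRanks)
  else if PySem.Chars.isIn ['-'] cs then
    let parts := PySem.Chars.splitOn cs ['-']
    parts.length = 2 ∧
    (let t := parts.getD 0 []
     let b := parts.getD 1 []
     let t0 := t.getD 0 ' '
     let t1 := t.getD 1 ' '
     let b0 := b.getD 0 ' '
     let b1 := b.getD 1 ' '
     2 ≤ t.length ∧ 2 ≤ b.length ∧
     (if t0 = t1 ∧ b0 = b1 then t0 ∈ pvRanks ∧ b0 ∈ pvRanks
      else if t0 = b0 ∧ t1 ≠ b1 then t0 ∈ pvRanks ∧ t1 ∈ pvRanks ∧ b1 ∈ pvRanks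
      else t0 ∈ pvRanks ∧ b0 ∈ pvRanks ∧ b1 ∈ pvRanks ∧
           (pvRanks.idxOf t0 < pvRanks.idxOf b0 ∨
            pvRanks.idxOf b1 + pvRanks.idxOf t0 - pvRanks.idxOf b0 ≤ 12)))
  else
    2 ≤ cs.length ∧ cs.getD 0 ' ' ∈ pvRanks ∧ cs.getD 1 ' ' ∈ pvRanks

instance (sub_range : String) : Decidable (Pre_parse_sub_range sub_range) := by
  unfold Pre_parse_sub_range; infer_instance

def pvWitness_parse_sub_range : String := "A7+"

def Spec_parse_sub_range (sub_range : String) (out : List String) : Prop := out = parse_sub_range_alt sub_range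
instance (sub_range : String) (out : List String) : Decidable (Spec_parse_sub_range sub_range out) := by unfold Spec_parse_sub_range; infer_instance

-- ===== CLAIM (what is proved, stated in full; the proofs are below) =====
def Claim_equal_parse_sub_range : Prop := ∀ (sub_range : String), Dom_parse_sub_range sub_range → Pre_parse_sub_range sub_range → Spec_parse_sub_range sub_range (parse_sub_range sub_range)

-- ===== LEMMAS AND PROOFS =====

lemma idx_facts : ∀ c ∈ pvRanks, codes_to_rank_map.getD c (-1) = bIdx c ∧
    bIdx c = ((pvRanks.idxOf c : Nat) : Int) ∧ 0 ≤ bIdx c ∧ bIdx c ≤ 12 ∧ bAt (bIdx c) = c := by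
  intro c hc; fin_cases hc <;> decide

lemma code_eq : ∀ i : Int, 0 ≤ i → i ≤ 12 → rank_to_codes_map.getD i [] = [bAt i] := by
  intro i h1 h2; interval_cases i <;> decide

lemma bIdx_bAt : ∀ i : Int, 0 ≤ i → i ≤ 12 → bIdx (bAt i) = i := by
  intro i h1 h2; interval_cases i <;> decide

lemma bAt_mem : ∀ i : Int, 0 ≤ i → i ≤ 12 → bAt i ∈ pvRanks := by
  intro i h1 h2; interval_cases i <;> decide

lemma get0 {α : Type} (x : α) (l : List α) (d : α) : PySem.List.pyGetD (x :: l) 0 d = x := by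
  simp [pysem]
lemma get1 {α : Type} (x y : α) (l : List α) (d : α) : PySem.List.pyGetD (x :: y :: l) 1 d = y := by
  simp [pysem]

lemma connLoop_eq (r11 r21 r22 : Int) (acc : List (List Char)) :
    connLoop r11 r21 r22 acc = acc ++ (List.range (r11 + 1 - r21).toNat).map
      (fun (k : Nat) => rank_to_codes_map.getD (r21 + k) [] ++ rank_to_codes_map.getD (r22 + k) []) := by
  induction hn : (r11 + 1 - r21).toNat generalizing r21 r22 acc with
  | zero =>
    rw [connLoop.eq_def, if_neg (by omega)]
    simp
  | succ n ih =>
    rw [connLoop.eq_def, if_pos (by omega), ih _ _ _ (by omega),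
      List.range_succ_eq_map]
    simp only [List.map_cons, List.map_map, List.append_assoc, List.singleton_append,
      Nat.cast_zero, add_zero]
    congr 2
    · apply List.map_congr_left
      intro k _
      simp only [Function.comp_apply]
      push_cast
      ring_nf

-- ---- middle forms: each A branch is a map over one pyRange interval ----

lemma pairs_mid (a b : List Char) (ca cb : Char)
    (hga : PySem.List.pyGetD a 0 ' ' = ca) (hgb : PySem.List.pyGetD b 0 ' ' = cb)
    (ha : ca ∈ pvRanks) (hb : cb ∈ pvRanks) :
    min_to_max_pairs a b =
      (PySem.List.pyRange (min (bIdx ca) (bIdx cb)) (max (bIdx ca) (bIdx cb) + 1) 1).map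
        (fun i => [bAt i, bAt i]) := by
  obtain ⟨ea, _, la, ua, _⟩ := idx_facts ca ha
  obtain ⟨eb, _, lb, ub, _⟩ := idx_facts cb hb
  unfold min_to_max_pairs
  rw [hga, hgb, ea, eb]
  apply List.map_congr_left
  intro i hi
  rw [PySem.List.mem_pyRange_one] at hi
  rw [code_eq i (by omega) (by omega), PySem.List.pyRepeat_singleton]
  simp

lemma non_pairs_mid (a b : List Char) (c0 c1 cb : Char)
    (hg0 : PySem.List.pyGetD a 0 ' ' = c0) (hg1 : PySem.List.pyGetD a 1 ' ' = c1)
    (hgb : PySem.List.pyGetD b 1 ' ' = cb)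
    (h1 : c1 ∈ pvRanks) (hb : cb ∈ pvRanks) :
    min_to_max_non_pairs a b =
      (PySem.List.pyRange (min (bIdx c1) (bIdx cb)) (max (bIdx c1) (bIdx cb) + 1) 1).map
        (fun i => [c0, bAt i]) := by
  obtain ⟨e1, _, l1, u1, _⟩ := idx_facts c1 h1
  obtain ⟨eb, _, lb, ub, _⟩ := idx_facts cb hb
  unfold min_to_max_non_pairs
  rw [hg0, hg1, hgb, e1, eb]
  apply List.map_congr_left
  intro i hi
  rw [PySem.List.mem_pyRange_one] at hi
  rw [code_eq i (by omega) (by omega)]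
  rfl

lemma conn_mid (a b : List Char) (ct cb0 cb1 : Char)
    (hga : PySem.List.pyGetD a 0 ' ' = ct) (hgb0 : PySem.List.pyGetD b 0 ' ' = cb0)
    (hgb1 : PySem.List.pyGetD b 1 ' ' = cb1)
    (ht : ct ∈ pvRanks) (hb0 : cb0 ∈ pvRanks) (hb1 : cb1 ∈ pvRanks)
    (hbnd : bIdx ct < bIdx cb0 ∨ bIdx cb1 + bIdx ct - bIdx cb0 ≤ 12) :
    min_to_max_connectors_and_gappers a b =
      (PySem.List.pyRange (bIdx cb0) (bIdx ct + 1) 1).map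
        (fun i => [bAt i, bAt (i - (bIdx cb0 - bIdx cb1))]) := by
  obtain ⟨et, _, lt, ut, _⟩ := idx_facts ct ht
  obtain ⟨eb0, _, lb0, ub0, _⟩ := idx_facts cb0 hb0
  obtain ⟨eb1, _, lb1, ub1, _⟩ := idx_facts cb1 hb1
  unfold min_to_max_connectors_and_gappers
  rw [hga, hgb0, hgb1, et, eb0, eb1, connLoop_eq, List.nil_append,
    PySem.List.pyRange_one, List.map_map]
  apply List.map_congr_left
  intro k hk
  rw [List.mem_range] at hk
  simp only [Function.comp_apply]
  rw [code_eq (bIdx cb0 + k) (by omega) (by omega),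
      code_eq (bIdx cb1 + k) (by omega) (by omega)]
  have h : bIdx cb0 + (k : Int) - (bIdx cb0 - bIdx cb1) = bIdx cb1 + k := by ring
  rw [h]
  rfl

-- ---- B side: the filtered grid collapses to the same interval maps ----

-- the grid comprehension of parse_sub_range_alt, as a function of the predicate
def gridOf (p : Int → Int → Bool) : List (List Char) :=
  (PySem.List.pyRange 0 13 1).flatMap (fun i =>
    ((PySem.List.pyRange 0 13 1).filter (fun j => p i j)).map (fun j => [bAt i, bAt j]))

lemma alt_grid (s : String) :
    parse_sub_range_alt s = (PySem.Set.ofList (gridOf (bPred s.toList))).map String.ofList := rfl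

lemma grid_congr (p q : Int → Int → Bool)
    (h : ∀ i j, 0 ≤ i → i < 13 → 0 ≤ j → j < 13 → p i j = q i j) :
    gridOf p = gridOf q := by
  unfold gridOf
  apply List.flatMap_congr
  intro i hi
  rw [PySem.List.mem_pyRange_one] at hi
  congr 1
  apply List.filter_congr
  intro j hj
  rw [PySem.List.mem_pyRange_one] at hj
  exact h i j hi.1 hi.2 hj.1 hj.2

lemma filter_single (c : Int) (h0 : 0 ≤ c) (h1 : c < 13) :
    (PySem.List.pyRange 0 13 1).filter (fun j => decide (j = c)) = [c] := by
  interval_cases c <;> decide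

lemma filter_interval (lo hi : Int) (h0 : 0 ≤ lo) (h0' : lo ≤ 13) (h1 : 0 ≤ hi) (h1' : hi ≤ 13) :
    (PySem.List.pyRange 0 13 1).filter (fun j => decide (lo ≤ j ∧ j < hi)) =
      PySem.List.pyRange lo hi 1 := by
  interval_cases lo <;> interval_cases hi <;> decide

lemma flatMap_eq_map_of {α β : Type} (l : List α) (g : α → List β) (v : α → β)
    (h : ∀ i ∈ l, g i = [v i]) : l.flatMap g = l.map v := by
  induction l with
  | nil => rfl
  | cons x xs ih =>
    simp only [List.flatMap_cons, List.map_cons, h x (by simp),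
      ih (fun i hi => h i (by simp [hi]))]
    rfl

lemma flatMap_nil_of {α β : Type} (l : List α) (g : α → List β)
    (h : ∀ i ∈ l, g i = []) : l.flatMap g = [] := by
  induction l with
  | nil => rfl
  | cons x xs ih => simp [List.flatMap_cons, h x (by simp), ih (fun i hi => h i (by simp [hi]))]

-- one contiguous window of the outer scan survives
lemma flatMap_window (g : Int → List (List Char)) (v : Int → List Char) (lo hi : Int)
    (h0 : 0 ≤ lo) (h1 : hi ≤ 13)
    (hin : ∀ i, lo ≤ i → i < hi → g i = [v i])
    (hout : ∀ i, 0 ≤ i → i < 13 → ¬(lo ≤ i ∧ i < hi) → g i = []) :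
    (PySem.List.pyRange 0 13 1).flatMap g = (PySem.List.pyRange lo hi 1).map v := by
  by_cases hle : hi ≤ lo
  · rw [PySem.List.pyRange_one_eq_nil hle, List.map_nil]
    apply flatMap_nil_of
    intro i hi'
    rw [PySem.List.mem_pyRange_one] at hi'
    exact hout i hi'.1 hi'.2 (by omega)
  · have hlh : lo ≤ hi := by omega
    rw [PySem.List.pyRange_one_append 0 lo 13 h0 (by omega),
        PySem.List.pyRange_one_append lo hi 13 hlh h1, List.flatMap_append, List.flatMap_append]
    rw [flatMap_nil_of (PySem.List.pyRange 0 lo 1) g (by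
      intro i hi'; rw [PySem.List.mem_pyRange_one] at hi'; exact hout i hi'.1 (by omega) (by omega))]
    rw [flatMap_nil_of (PySem.List.pyRange hi 13 1) g (by
      intro i hi'; rw [PySem.List.mem_pyRange_one] at hi'; exact hout i (by omega) hi'.2 (by omega))]
    rw [flatMap_eq_map_of (PySem.List.pyRange lo hi 1) g v (by
      intro i hi'; rw [PySem.List.mem_pyRange_one] at hi'; exact hin i hi'.1 hi'.2)]
    simp

-- diagonal-shaped predicates: j determined by i, i over a window
lemma grid_shift (d lo hi : Int) (h0 : 0 ≤ lo) (h1 : hi ≤ 13)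
    (hd : ∀ i, lo ≤ i → i < hi → 0 ≤ i - d ∧ i - d ≤ 12) :
    gridOf (fun i j => decide (j = i - d ∧ lo ≤ i ∧ i < hi)) =
      (PySem.List.pyRange lo hi 1).map (fun i => [bAt i, bAt (i - d)]) := by
  unfold gridOf
  apply flatMap_window _ _ lo hi h0 h1
  · intro i hlo hhi
    have hb := hd i hlo hhi
    rw [List.filter_congr (q := fun j => decide (j = i - d)) (by intro j _; simp [hlo, hhi])]
    rw [filter_single (i - d) (by omega) (by omega)]
    rfl
  · intro i _ _ hnot
    rw [List.filter_eq_nil_iff.mpr (by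
      intro j _
      simp only [decide_eq_true_eq]
      exact fun h' => hnot h'.2)]
    rfl

-- row-shaped predicates: i fixed, j over a window
lemma flatMap_one (g : Int → List (List Char)) (a : Int) (h0 : 0 ≤ a) (h1 : a < 13)
    (hout : ∀ i, i ≠ a → g i = []) :
    (PySem.List.pyRange 0 13 1).flatMap g = g a := by
  rw [PySem.List.pyRange_one_append 0 a 13 h0 (by omega),
      PySem.List.pyRange_one_cons (show a < 13 from h1), List.flatMap_append, List.flatMap_cons]
  rw [flatMap_nil_of (PySem.List.pyRange 0 a 1) g (by
    intro i hi'; rw [PySem.List.mem_pyRange_one] at hi'; exact hout i (by omega))]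
  rw [flatMap_nil_of (PySem.List.pyRange (a+1) 13 1) g (by
    intro i hi'; rw [PySem.List.mem_pyRange_one] at hi'; exact hout i (by omega))]
  simp

lemma grid_row (a lo hi : Int) (ha0 : 0 ≤ a) (ha1 : a ≤ 12)
    (h0 : 0 ≤ lo) (h0' : lo ≤ 13) (h1 : 0 ≤ hi) (h1' : hi ≤ 13) :
    gridOf (fun i j => decide (i = a ∧ lo ≤ j ∧ j < hi)) =
      (PySem.List.pyRange lo hi 1).map (fun j => [bAt a, bAt j]) := by
  unfold gridOf
  rw [flatMap_one _ a ha0 (by omega) (by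
    intro i hne
    rw [List.filter_eq_nil_iff.mpr (by
      intro j _; simp only [decide_eq_true_eq]; exact fun h' => hne h'.1)]
    rfl)]
  rw [List.filter_congr (q := fun j => decide (lo ≤ j ∧ j < hi)) (by intro j _; simp)]
  rw [filter_interval lo hi h0 h0' h1 h1']

-- ---- branch equalities: A's generated list = B's filtered grid, element for element ----

lemma bAt_inj (i j : Int) (hi0 : 0 ≤ i) (hi1 : i ≤ 12) (hj0 : 0 ≤ j) (hj1 : j ≤ 12)
    (h : bAt i = bAt j) : i = j := by
  have := congrArg bIdx h
  rwa [bIdx_bAt i hi0 hi1, bIdx_bAt j hj0 hj1] at this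

lemma plus_pair_grid (c : Char) (rest : List Char) (h : c ∈ pvRanks) :
    plus_range (c :: c :: rest) = gridOf (fun i j => decide (i = j ∧ bIdx c ≤ i)) := by
  obtain ⟨e, _, l, u, a⟩ := idx_facts c h
  unfold plus_range
  rw [get0, get1, if_pos rfl]
  unfold min_to_max
  rw [if_pos (by simp [get1])]
  rw [pairs_mid ['A','A'] (c :: c :: rest) 'A' c (by decide) (by rw [get0]) (by decide) h]
  have hA : bIdx 'A' = 12 := by decide
  rw [hA, show min 12 (bIdx c) = bIdx c from by omega, show max 12 (bIdx c) = 12 from by omega]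
  rw [grid_congr _ (fun i j => decide (j = i - 0 ∧ bIdx c ≤ i ∧ i < 13))
    (by intro i j hi0 hi13 hj0 hj13; apply decide_eq_decide.mpr; omega)]
  rw [grid_shift 0 (bIdx c) 13 l (by omega) (by intro i h1 h2; omega)]
  rw [show (12 : Int) + 1 = 13 from rfl]
  apply List.map_congr_left
  intro i _
  simp

lemma plus_nonpair_grid (c0 c1 : Char) (rest : List Char) (hne : c0 ≠ c1)
    (h0 : c0 ∈ pvRanks) (h1 : c1 ∈ pvRanks) :
    plus_range (c0 :: c1 :: rest) =
      gridOf (fun i j => decide (i = max (bIdx c0) (bIdx c1) ∧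
        min (bIdx c0) (bIdx c1) ≤ j ∧ j < max (bIdx c0) (bIdx c1))) := by
  obtain ⟨e0, i0, l0, u0, a0⟩ := idx_facts c0 h0
  obtain ⟨e1, i1, l1, u1, a1⟩ := idx_facts c1 h1
  have hxy : bIdx c0 ≠ bIdx c1 := fun h => hne (by rw [← a0, h, a1])
  set x := bIdx c0 with hx
  set y := bIdx c1 with hy
  set hi := max x y with hhi
  set lo := min x y with hlo
  have hb : 0 ≤ lo ∧ lo < hi ∧ hi ≤ 12 := by
    refine ⟨by omega, ?_, by omega⟩
    rcases lt_or_gt_of_ne hxy with h | h <;> omega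
  unfold plus_range
  simp only [get0, get1, if_neg hne]
  rw [e0, e1,
      code_eq hi (by omega) (by omega), code_eq lo (by omega) (by omega),
      code_eq (hi - 1) (by omega) (by omega)]
  simp only [List.cons_append, List.nil_append]
  -- B side: the predicate is row-shaped
  rw [grid_row hi lo hi (by omega) (by omega) (by omega) (by omega) (by omega) (by omega)]
  unfold min_to_max
  rw [if_neg (by
    simp only [get0, get1]
    intro ⟨h', _⟩
    exact absurd (bAt_inj hi lo (by omega) (by omega) (by omega) (by omega) h') (by omega))]
  by_cases hloc : lo = hi - 1
  · -- bottom_hand = top_hand: connectors branch, one hand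
    rw [if_neg (by
      simp only [get0, get1]
      intro ⟨_, h'⟩
      exact h' (by rw [hloc]))]
    rw [conn_mid _ _ (bAt hi) (bAt hi) (bAt (hi - 1)) (by rw [get0]) (by rw [get0]) (by rw [get1])
      (bAt_mem hi (by omega) (by omega)) (bAt_mem hi (by omega) (by omega))
      (bAt_mem (hi - 1) (by omega) (by omega))
      (by rw [bIdx_bAt hi (by omega) (by omega), bIdx_bAt (hi - 1) (by omega) (by omega)]; omega)]
    rw [bIdx_bAt hi (by omega) (by omega), bIdx_bAt (hi - 1) (by omega) (by omega)]
    have hr : PySem.List.pyRange (hi - 1) hi 1 = [hi - 1] := by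
      have h2 := PySem.List.pyRange_one_singleton (a := hi - 1)
      rwa [show hi - 1 + 1 = hi from by omega] at h2
    rw [PySem.List.pyRange_one_singleton, hloc, hr]
    simp only [List.map_cons, List.map_nil]
    rw [show hi - (hi - (hi - 1)) = hi - 1 from by omega]
  · -- non-pairs branch
    rw [if_pos (by
      simp only [get0, get1]
      exact ⟨trivial, fun h' => hloc (bAt_inj lo (hi - 1) (by omega) (by omega) (by omega) (by omega) h')⟩)]
    rw [non_pairs_mid _ _ (bAt hi) (bAt lo) (bAt (hi - 1)) (by rw [get0]) (by rw [get1]) (by rw [get1])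
      (bAt_mem lo (by omega) (by omega)) (bAt_mem (hi - 1) (by omega) (by omega))]
    rw [bIdx_bAt lo (by omega) (by omega), bIdx_bAt (hi - 1) (by omega) (by omega),
        show min lo (hi - 1) = lo from by omega, show max lo (hi - 1) = hi - 1 from by omega,
        show hi - 1 + 1 = hi from by omega]

lemma dash_pairs_grid (t0 t1 b0 b1 : Char) (tr br : List Char)
    (hp : t0 = t1 ∧ b0 = b1) (ht : t0 ∈ pvRanks) (hb : b0 ∈ pvRanks) :
    min_to_max (t0 :: t1 :: tr) (b0 :: b1 :: br) =
      gridOf (fun i j => decide (i = j ∧ min (bIdx t0) (bIdx b0) ≤ i ∧ i ≤ max (bIdx t0) (bIdx b0))) := by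
  obtain ⟨et, _, lt', ut, _⟩ := idx_facts t0 ht
  obtain ⟨eb, _, lb, ub, _⟩ := idx_facts b0 hb
  unfold min_to_max
  rw [if_pos (by simpa [get0, get1] using hp)]
  rw [pairs_mid _ _ t0 b0 (by rw [get0]) (by rw [get0]) ht hb]
  rw [grid_congr _ (fun i j => decide (j = i - 0 ∧ min (bIdx t0) (bIdx b0) ≤ i ∧
        i < max (bIdx t0) (bIdx b0) + 1))
    (by intro i j hi0 hi13 hj0 hj13; apply decide_eq_decide.mpr; omega)]
  rw [grid_shift 0 _ _ (by omega) (by omega) (by intro i h1 h2; omega)]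
  apply List.map_congr_left
  intro i _
  simp

lemma dash_nonpairs_grid (t0 t1 b0 b1 : Char) (tr br : List Char)
    (hp : ¬(t0 = t1 ∧ b0 = b1)) (hq : t0 = b0 ∧ t1 ≠ b1)
    (ht0 : t0 ∈ pvRanks) (ht1 : t1 ∈ pvRanks) (hb1 : b1 ∈ pvRanks) :
    min_to_max (t0 :: t1 :: tr) (b0 :: b1 :: br) =
      gridOf (fun i j => decide (i = bIdx t0 ∧ min (bIdx t1) (bIdx b1) ≤ j ∧
        j ≤ max (bIdx t1) (bIdx b1))) := by
  obtain ⟨e0, _, l0, u0, a0⟩ := idx_facts t0 ht0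
  obtain ⟨e1, _, l1, u1, _⟩ := idx_facts t1 ht1
  obtain ⟨eb, _, lb, ub, _⟩ := idx_facts b1 hb1
  unfold min_to_max
  rw [if_neg (by simpa [get0, get1] using hp),
      if_pos (by simpa [get0, get1] using hq)]
  rw [non_pairs_mid _ _ t0 t1 b1 (by rw [get0]) (by rw [get1]) (by rw [get1]) ht1 hb1]
  rw [grid_congr _ (fun i j => decide (i = bIdx t0 ∧ min (bIdx t1) (bIdx b1) ≤ j ∧
        j < max (bIdx t1) (bIdx b1) + 1))
    (by intro i j hi0 hi13 hj0 hj13; apply decide_eq_decide.mpr; omega)]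
  rw [grid_row (bIdx t0) _ _ l0 u0 (by omega) (by omega) (by omega) (by omega)]
  apply List.map_congr_left
  intro i _
  rw [a0]

lemma dash_conn_grid (t0 t1 b0 b1 : Char) (tr br : List Char)
    (hp : ¬(t0 = t1 ∧ b0 = b1)) (hq : ¬(t0 = b0 ∧ t1 ≠ b1))
    (ht0 : t0 ∈ pvRanks) (hb0 : b0 ∈ pvRanks) (hb1 : b1 ∈ pvRanks)
    (hbnd : pvRanks.idxOf t0 < pvRanks.idxOf b0 ∨
            pvRanks.idxOf b1 + pvRanks.idxOf t0 - pvRanks.idxOf b0 ≤ 12) :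
    min_to_max (t0 :: t1 :: tr) (b0 :: b1 :: br) =
      gridOf (fun i j => decide (i - j = bIdx b0 - bIdx b1 ∧ bIdx b0 ≤ i ∧ i ≤ bIdx t0)) := by
  obtain ⟨e0, i0, l0, u0, _⟩ := idx_facts t0 ht0
  obtain ⟨eb0, ib0, lb0, ub0, _⟩ := idx_facts b0 hb0
  obtain ⟨eb1, ib1, lb1, ub1, _⟩ := idx_facts b1 hb1
  have hbnd' : bIdx t0 < bIdx b0 ∨ bIdx b1 + bIdx t0 - bIdx b0 ≤ 12 := by
    rw [i0, ib0, ib1]; omega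
  unfold min_to_max
  rw [if_neg (by simpa [get0, get1] using hp),
      if_neg (by simpa [get0, get1] using hq)]
  rw [conn_mid _ _ t0 b0 b1 (by rw [get0]) (by rw [get0]) (by rw [get1]) ht0 hb0 hb1 hbnd']
  rw [grid_congr _ (fun i j => decide (j = i - (bIdx b0 - bIdx b1) ∧ bIdx b0 ≤ i ∧
        i < bIdx t0 + 1))
    (by intro i j hi0 hi13 hj0 hj13; apply decide_eq_decide.mpr; omega)]
  rw [grid_shift (bIdx b0 - bIdx b1) (bIdx b0) (bIdx t0 + 1) lb0 (by omega)
    (by intro i h1 h2; omega)]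

lemma dash_all (t0 t1 b0 b1 : Char) (tr br : List Char)
    (hpre : if t0 = t1 ∧ b0 = b1 then t0 ∈ pvRanks ∧ b0 ∈ pvRanks
      else if t0 = b0 ∧ t1 ≠ b1 then t0 ∈ pvRanks ∧ t1 ∈ pvRanks ∧ b1 ∈ pvRanks
      else t0 ∈ pvRanks ∧ b0 ∈ pvRanks ∧ b1 ∈ pvRanks ∧
           (pvRanks.idxOf t0 < pvRanks.idxOf b0 ∨
            pvRanks.idxOf b1 + pvRanks.idxOf t0 - pvRanks.idxOf b0 ≤ 12)) :
    min_to_max (t0 :: t1 :: tr) (b0 :: b1 :: br) =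
      gridOf (
        if PySem.List.pyGetD (t0 :: t1 :: tr) 0 ' ' = PySem.List.pyGetD (t0 :: t1 :: tr) 1 ' ' ∧
           PySem.List.pyGetD (b0 :: b1 :: br) 0 ' ' = PySem.List.pyGetD (b0 :: b1 :: br) 1 ' ' then
          let lo := min (bIdx (PySem.List.pyGetD (t0 :: t1 :: tr) 0 ' '))
                        (bIdx (PySem.List.pyGetD (b0 :: b1 :: br) 0 ' '))
          let hi := max (bIdx (PySem.List.pyGetD (t0 :: t1 :: tr) 0 ' '))
                        (bIdx (PySem.List.pyGetD (b0 :: b1 :: br) 0 ' '))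
          fun i j => decide (i = j ∧ lo ≤ i ∧ i ≤ hi)
        else if PySem.List.pyGetD (t0 :: t1 :: tr) 0 ' ' = PySem.List.pyGetD (b0 :: b1 :: br) 0 ' ' ∧
                PySem.List.pyGetD (t0 :: t1 :: tr) 1 ' ' ≠ PySem.List.pyGetD (b0 :: b1 :: br) 1 ' ' then
          let a := bIdx (PySem.List.pyGetD (t0 :: t1 :: tr) 0 ' ')
          let lo := min (bIdx (PySem.List.pyGetD (t0 :: t1 :: tr) 1 ' '))
                        (bIdx (PySem.List.pyGetD (b0 :: b1 :: br) 1 ' '))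
          let hi := max (bIdx (PySem.List.pyGetD (t0 :: t1 :: tr) 1 ' '))
                        (bIdx (PySem.List.pyGetD (b0 :: b1 :: br) 1 ' '))
          fun i j => decide (i = a ∧ lo ≤ j ∧ j ≤ hi)
        else
          let t := bIdx (PySem.List.pyGetD (t0 :: t1 :: tr) 0 ' ')
          let b0' := bIdx (PySem.List.pyGetD (b0 :: b1 :: br) 0 ' ')
          let b1' := bIdx (PySem.List.pyGetD (b0 :: b1 :: br) 1 ' ')
          fun i j => decide (i - j = b0' - b1' ∧ b0' ≤ i ∧ i ≤ t)) := by
  simp only [get0, get1]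
  by_cases hp : t0 = t1 ∧ b0 = b1
  · rw [if_pos hp] at hpre
    rw [if_pos hp]
    exact dash_pairs_grid t0 t1 b0 b1 tr br hp hpre.1 hpre.2
  · rw [if_neg hp] at hpre
    rw [if_neg hp]
    by_cases hq2 : t0 = b0 ∧ t1 ≠ b1
    · rw [if_pos hq2] at hpre
      rw [if_pos hq2]
      exact dash_nonpairs_grid t0 t1 b0 b1 tr br hp hq2 hpre.1 hpre.2.1 hpre.2.2
    · rw [if_neg hq2] at hpre
      rw [if_neg hq2]
      exact dash_conn_grid t0 t1 b0 b1 tr br hp hq2 hpre.1 hpre.2.1 hpre.2.2.1 hpre.2.2.2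

lemma single_grid (c0 c1 : Char) (rest : List Char) (h0 : c0 ∈ pvRanks) (h1 : c1 ∈ pvRanks) :
    [single_hand (c0 :: c1 :: rest)] =
      gridOf (fun i j => decide (i = max (bIdx c0) (bIdx c1) ∧ j = min (bIdx c0) (bIdx c1))) := by
  obtain ⟨e0, _, l0, u0, _⟩ := idx_facts c0 h0
  obtain ⟨e1, _, l1, u1, _⟩ := idx_facts c1 h1
  unfold single_hand
  simp only [get0, get1]
  rw [e0, e1,
      code_eq (max (bIdx c0) (bIdx c1)) (by omega) (by omega),
      code_eq (min (bIdx c0) (bIdx c1)) (by omega) (by omega)]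
  rw [grid_congr _ (fun i j => decide (i = max (bIdx c0) (bIdx c1) ∧
        min (bIdx c0) (bIdx c1) ≤ j ∧ j < min (bIdx c0) (bIdx c1) + 1))
    (by intro i j hi0 hi13 hj0 hj13; apply decide_eq_decide.mpr; omega)]
  rw [grid_row _ _ _ (by omega) (by omega) (by omega) (by omega) (by omega) (by omega),
      PySem.List.pyRange_one_singleton]
  rfl

-- ---- assembling the four top-level cases ----

lemma parse_sub_range_eq (s : String) (hpre : Pre_parse_sub_range s) :
    parse_sub_range s = parse_sub_range_alt s := by
  rw [alt_grid]
  unfold parse_sub_range bPred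
  unfold Pre_parse_sub_range at hpre
  simp only [] at hpre ⊢
  by_cases hplus : PySem.Chars.isIn ['+'] s.toList
  · simp only [hplus, if_true] at hpre ⊢
    rcases hq : PySem.Chars.stripChars s.toList ['+'] with _ | ⟨c0, _ | ⟨c1, rest⟩⟩
    · rw [hq] at hpre; simp at hpre
    · rw [hq] at hpre; simp at hpre
    · rw [hq] at hpre
      obtain ⟨_, h0, h1⟩ := hpre
      simp only [List.getD_cons_zero, List.getD_cons_succ] at h0 h1
      rw [show (PySem.Set.empty : PySem.Set (List Char)) = [] from rfl,
          ← PySem.Set.ofList_eq_foldl]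
      by_cases hc : c0 = c1
      · subst hc
        rw [if_pos (by rw [get0, get1])]
        exact congrArg (List.map String.ofList)
          (congrArg PySem.Set.ofList (by rw [get0]; exact plus_pair_grid c0 rest h0))
      · rw [if_neg (by rw [get0, get1]; exact hc)]
        exact congrArg (List.map String.ofList)
          (congrArg PySem.Set.ofList (by
            rw [get0, get1]
            exact plus_nonpair_grid c0 c1 rest hc h0 (h1 hc)))
  · simp only [hplus, if_false, Bool.false_eq_true] at hpre ⊢
    by_cases hdash : PySem.Chars.isIn ['-'] s.toList
    · simp only [hdash, if_true] at hpre ⊢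
      unfold dash_range
      rcases hq : PySem.Chars.splitOn s.toList ['-'] with _ | ⟨t, _ | ⟨b, _ | ⟨z, zs⟩⟩⟩
      · rw [hq] at hpre; simp at hpre
      · rw [hq] at hpre; simp at hpre
      · rw [hq] at hpre
        obtain ⟨_, hpre⟩ := hpre
        simp only [List.getD_cons_zero, List.getD_cons_succ] at hpre
        obtain ⟨hlt, hlb, hpre⟩ := hpre
        rcases t with _ | ⟨t0, _ | ⟨t1, tr⟩⟩
        · simp at hlt
        · simp at hlt
        rcases b with _ | ⟨b0, _ | ⟨b1, br⟩⟩
        · simp at hlb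
        · simp at hlb
        simp only [List.getD_cons_zero, List.getD_cons_succ] at hpre
        rw [show (PySem.Set.empty : PySem.Set (List Char)) = [] from rfl,
            ← PySem.Set.ofList_eq_foldl]
        exact congrArg (List.map String.ofList)
          (congrArg PySem.Set.ofList (dash_all t0 t1 b0 b1 tr br hpre))
      · rw [hq] at hpre; simp at hpre
    · simp only [hdash, if_false, Bool.false_eq_true] at hpre ⊢
      rcases hq : s.toList with _ | ⟨c0, _ | ⟨c1, rest⟩⟩
      · rw [hq] at hpre; simp at hpre
      · rw [hq] at hpre; simp at hpre
      · rw [hq] at hpre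
        obtain ⟨_, h0, h1⟩ := hpre
        simp only [List.getD_cons_zero, List.getD_cons_succ] at h0 h1
        rw [get0, get1]
        exact congrArg (List.map String.ofList)
          (congrArg PySem.Set.ofList (single_grid c0 c1 rest h0 h1))

-- ===== VERDICT (by name: the statement is the Claim_ definition above) =====
theorem parse_sub_range_spec : Claim_equal_parse_sub_range := by
  intro s _ hpre
  exact parse_sub_range_eq s hpre
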